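-- pv_equiv track=rewrite | github.com/Abercus/devianceminingthesis | DevianceMiningPipeline/declaretemplates_data.py | template_alternate_precedence_data
-- ===== SOURCE A (Python) =====
-- def template_alternate_precedence_data(trace, event_set):
--     """
--       precedence(A, B) template indicates that event B
--       should occur only if event A has occurred before.
--
--       Alternate condition:
--       "events must alternate without repetitions of these events in between"
--
--       :param trace:
--       :param event_set:
--       :return:
--       """
--
--     # exactly 2 event
--     assert (len(event_set) == 2)
--
--     fulfillments = []
--     violations = []
--
--     event_1 = event_set[0]
--     event_2 = event_set[1]
--     if event_2 in trace:
--         if event_1 in trace: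
--             # Go through two lists, one by one
--             # first events pos must be before 2nd lists first pos etc...
--             # A -> A -> B -> A -> B
--
--             event_1_positions = trace[event_1]
--             event_2_positions = trace[event_2]
--             # FOR every EVENT 2: Going before in the log: THERE MUST BE EVENT 1 BEFORE EVENT 2!
--             # Keep track of largest event_1_pos before current event_2_pos. Sorting array.
--             merged = []
--             event_1_ind = 0
--             event_2_ind = 0
--             while event_1_ind < len(event_1_positions) and event_2_ind < len(event_2_positions):
--                 if event_1_positions[event_1_ind] < event_2_positions[event_2_ind]:
--                     merged.append((1, event_1_positions[event_1_ind]))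
--                     event_1_ind += 1
--                 else:
--                     merged.append((2, event_2_positions[event_2_ind]))
--                     event_2_ind += 1
--
--             # Merge leftovers
--             while event_1_ind < len(event_1_positions):
--                 merged.append((1, event_1_positions[event_1_ind]))
--                 event_1_ind += 1
--
--             while event_2_ind < len(event_2_positions):
--                 merged.append((2, event_2_positions[event_2_ind]))
--                 event_2_ind += 1
--
--             # Go through array, at every point check if (2, x). If 2, then check if previous is 2 or 1.
--             for i in range(len(merged)):
--                 if merged[i][0] == 2:
--                     if i == 0:
--                         # If first one, then previous cant be 1. violation.
--                         violations.append(merged[i][1])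
--                     elif merged[i-1][0] == 1:
--                         # If is not same, then no violation
--                         fulfillments.append(merged[i][1])
--                     else:
--                         # Therefore if previous is same... then violation
--                         violations.append(merged[i][1])
--
--             if len(violations) > 0:
--                 return -1, False, fulfillments, violations
--             else:
--                 return len(fulfillments), False, fulfillments, violations
--
--         else:
--             # impossible because there has to be at least one event1 with event2. Therefore all activations are violated
--             return -1, False, [], trace[event_2]
--
--     return 0, True, [], []  # todo: vacuity condition!!
-- ===== SOURCE B (Python) =====
-- def template_alternate_precedence_data(trace, event_set):
--     assert (len(event_set) == 2)
--     event_1, event_2 = event_set[0], event_set[1]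
--     if event_2 not in trace:
--         return 0, True, [], []  # vacuous
--     if event_1 not in trace:
--         return -1, False, [], trace[event_2]
--     a = trace[event_1]
--     b = trace[event_2]
--     fulfillments = []
--     violations = []
--     i = 0
--     # one fused pass: advance a pointer through event_1 positions per event_2
--     # position; the occurrence is fulfilled iff the pointer moved for it.
--     for p2 in b:
--         start = i
--         while i < len(a) and a[i] < p2:
--             i += 1
--         if i > start:
--             fulfillments.append(p2)
--         else:
--             violations.append(p2)
--     if violations:
--         return -1, False, fulfillments, violations
--     return len(fulfillments), False, fulfillments, violations
-- ===== Notes on version B (the rewrite author's own statement) =====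
-- stated objective: simpler
-- what changed: Replaced A's three merge loops building a tagged 'merged' list plus a separate index-based classification scan by a single fused pass: one pointer advances through event_1 positions per event_2 position, and the occurrence is fulfilled iff the pointer moved for it; no intermediate list, no tag tuples.
import Mathlib
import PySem

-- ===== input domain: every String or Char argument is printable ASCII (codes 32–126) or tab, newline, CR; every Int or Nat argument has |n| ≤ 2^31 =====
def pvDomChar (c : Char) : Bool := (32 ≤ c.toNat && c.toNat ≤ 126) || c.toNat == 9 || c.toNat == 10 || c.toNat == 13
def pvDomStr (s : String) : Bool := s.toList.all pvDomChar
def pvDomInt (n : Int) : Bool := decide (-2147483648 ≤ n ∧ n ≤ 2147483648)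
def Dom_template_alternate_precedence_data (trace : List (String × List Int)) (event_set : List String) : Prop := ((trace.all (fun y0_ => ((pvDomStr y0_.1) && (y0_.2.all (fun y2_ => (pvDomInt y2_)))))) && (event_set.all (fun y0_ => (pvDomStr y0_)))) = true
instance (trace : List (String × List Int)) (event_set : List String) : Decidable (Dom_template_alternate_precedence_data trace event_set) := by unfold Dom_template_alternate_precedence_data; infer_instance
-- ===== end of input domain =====

-- B drops A's intermediate tagged merged list: one fused pass with a pointer into the
-- event_1 positions; an event_2 position is a fulfillment iff the pointer advanced for it.
-- A mutates nothing; equivalence is about the return value.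

-- shared: dict membership/lookup on the association list (first match), as Python's 'in' / [] on a dict
def pvLookup (trace : List (String × List Int)) (k : String) : Option (List Int) :=
  match trace with
  | [] => none
  | (k', v) :: rest => if k' == k then some v else pvLookup rest k

-- ===== PORT A =====
-- the two merge-leftover loops of A are the base cases of this recursion
def pvMergeA : List Int → List Int → List (Int × Int)
  | [], bs => bs.map (fun x => (2, x))
  | a :: as_, [] => (1, a) :: pvMergeA as_ []
  | a :: as_, b :: bs => if a < b then (1, a) :: pvMergeA as_ (b :: bs)
                         else (2, b) :: pvMergeA (a :: as_) bs

-- A's classification scan over 'merged'; prev is merged[i-1]'s tag (none at i = 0)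
def pvClassifyA (prev : Option Int) : List (Int × Int) → List Int × List Int
  | [] => ([], [])
  | (t, x) :: rest =>
    let (f, v) := pvClassifyA (some t) rest
    if t == 2 then
      match prev with
      | none => (f, x :: v)
      | some p => if p == 1 then (x :: f, v) else (f, x :: v)
    else (f, v)

def template_alternate_precedence_data (trace : List (String × List Int)) (event_set : List String) : Int × Bool × List Int × List Int :=
  let event_1 := (PySem.List.pyGet? event_set 0).getD ""
  let event_2 := (PySem.List.pyGet? event_set 1).getD ""
  match pvLookup trace event_2 with
  | none => (0, true, [], [])
  | some event_2_positions =>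
    match pvLookup trace event_1 with
    | none => (-1, false, [], event_2_positions)
    | some event_1_positions =>
      let merged := pvMergeA event_1_positions event_2_positions
      let (fulfillments, violations) := pvClassifyA none merged
      if violations.length > 0 then (-1, false, fulfillments, violations)
      else ((fulfillments.length : Int), false, fulfillments, violations)

-- ===== PORT B =====
-- Source B's inner while loop: advance the pointer past event_1 positions < p; returns
-- the remaining suffix and whether it advanced at all
def pvAdvance : List Int → Int → List Int × Bool
  | [], _ => ([], false)
  | x :: xs, p => if x < p then ((pvAdvance xs p).1, true) else (x :: xs, false)

-- Source B's for loop over the event_2 positions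
def pvBLoop : List Int → List Int → List Int × List Int
  | _, [] => ([], [])
  | a, p :: rest =>
    let (a', adv) := pvAdvance a p
    let (f, v) := pvBLoop a' rest
    if adv then (p :: f, v) else (f, p :: v)

def template_alternate_precedence_data_alt (trace : List (String × List Int)) (event_set : List String) : Int × Bool × List Int × List Int :=
  let event_1 := (PySem.List.pyGet? event_set 0).getD ""
  let event_2 := (PySem.List.pyGet? event_set 1).getD ""
  match pvLookup trace event_2 with
  | none => (0, true, [], [])
  | some b =>
    match pvLookup trace event_1 with
    | none => (-1, false, [], b)
    | some a =>
      let (fulfillments, violations) := pvBLoop a b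
      if violations.length > 0 then (-1, false, fulfillments, violations)
      else ((fulfillments.length : Int), false, fulfillments, violations)

-- ===== PRECONDITION & SPEC =====
-- A asserts len(event_set) == 2 (AssertionError otherwise); nothing else raises.
def Pre_template_alternate_precedence_data (trace : List (String × List Int)) (event_set : List String) : Prop := event_set.length = 2
instance (trace : List (String × List Int)) (event_set : List String) : Decidable (Pre_template_alternate_precedence_data trace event_set) := by unfold Pre_template_alternate_precedence_data; infer_instance
def pvWitness_template_alternate_precedence_data : (List (String × List Int)) × List String := ([("a", [0, 3]), ("b", [1, 4])], ["a", "b"])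

def Spec_template_alternate_precedence_data (trace : List (String × List Int)) (event_set : List String) (out : Int × Bool × List Int × List Int) : Prop := out = template_alternate_precedence_data_alt trace event_set
instance (trace : List (String × List Int)) (event_set : List String) (out : Int × Bool × List Int × List Int) : Decidable (Spec_template_alternate_precedence_data trace event_set out) := by unfold Spec_template_alternate_precedence_data; infer_instance

-- ===== CLAIM (what is proved, stated in full; the proofs are below) =====
def Claim_equal_template_alternate_precedence_data : Prop := ∀ (trace : List (String × List Int)) (event_set : List String), Dom_template_alternate_precedence_data trace event_set → Pre_template_alternate_precedence_data trace event_set → Spec_template_alternate_precedence_data trace event_set (template_alternate_precedence_data trace event_set)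

-- ===== LEMMAS AND PROOFS =====

-- with no event_2 positions left, A's scan yields nothing (all remaining tags are 1)
theorem pv_nil : ∀ (as : List Int) (prev : Option Int), pvClassifyA prev (pvMergeA as []) = ([], []) := by
  intro as
  induction as with
  | nil => intro prev; simp [pvMergeA, pvClassifyA]
  | cons a as' ih => intro prev; simp [pvMergeA, pvClassifyA, ih]

-- joint invariant: A's classify-over-merge equals B's fused loop.
-- Entered with prev ≠ some 1 (none initially, some 2 after an event_2 element) it is pvBLoop;
-- entered with prev = some 1 (mid-advance) the current event_2 position is a fulfillment.
theorem pv_main : ∀ n as bs, as.length + bs.length = n →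
    ((∀ prev : Option Int, prev = none ∨ prev = some 2 →
        pvClassifyA prev (pvMergeA as bs) = pvBLoop as bs) ∧
     (∀ b rest, bs = b :: rest →
        pvClassifyA (some 1) (pvMergeA as bs) =
          ((b :: (pvBLoop (pvAdvance as b).1 rest).1), (pvBLoop (pvAdvance as b).1 rest).2))) := by
  intro n
  induction n using Nat.strong_induction_on with
  | _ n ih =>
    intro as bs hn
    constructor
    · intro prev hprev
      match as, bs with
      | as, [] => simp [pv_nil, pvBLoop]
      | [], b :: rest =>
        have hm := (ih (rest.length) (by simp at hn; omega) [] rest (by simp)).1 (some 2) (by simp)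
        simp only [pvMergeA] at hm
        rcases hprev with h | h <;>
          simp [pvMergeA, pvClassifyA, pvBLoop, pvAdvance, h, hm]
      | a :: as', b :: rest =>
        by_cases hab : a < b
        · have ha := (ih (as'.length + (b :: rest).length) (by simp at hn ⊢; omega) as' (b :: rest) rfl).2 b rest rfl
          simp only [pvMergeA, if_pos hab, pvClassifyA]
          rcases hprev with h | h <;>
            simp [ha, pvBLoop, pvAdvance, if_pos hab]
        · have hm := (ih ((a :: as').length + rest.length) (by simp at hn ⊢; omega) (a :: as') rest rfl).1 (some 2) (by simp)
          simp only [pvMergeA, if_neg hab, pvClassifyA]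
          rcases hprev with h | h <;>
            simp [h, hm, pvBLoop, pvAdvance, if_neg hab]
    · intro b rest hbs
      subst hbs
      match as with
      | [] =>
        have hm := (ih (rest.length) (by simp at hn; omega) [] rest (by simp)).1 (some 2) (by simp)
        simp only [pvMergeA] at hm
        simp [pvMergeA, pvClassifyA, pvAdvance, hm]
      | a :: as' =>
        by_cases hab : a < b
        · have ha := (ih (as'.length + (b :: rest).length) (by simp at hn ⊢; omega) as' (b :: rest) rfl).2 b rest rfl
          simp only [pvMergeA, if_pos hab, pvClassifyA]
          simp [ha, pvAdvance, if_pos hab]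
        · have hm := (ih ((a :: as').length + rest.length) (by simp at hn ⊢; omega) (a :: as') rest rfl).1 (some 2) (by simp)
          simp only [pvMergeA, if_neg hab, pvClassifyA]
          simp [hm, pvAdvance, if_neg hab]

-- ===== VERDICT (by name: the statement is the Claim_ definition above) =====
theorem template_alternate_precedence_data_spec : Claim_equal_template_alternate_precedence_data := by
  intro trace event_set _ _
  unfold Spec_template_alternate_precedence_data
  unfold template_alternate_precedence_data template_alternate_precedence_data_alt
  cases h2 : pvLookup trace ((PySem.List.pyGet? event_set 1).getD "") with
  | none => simp [h2]
  | some bpos =>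
    cases h1 : pvLookup trace ((PySem.List.pyGet? event_set 0).getD "") with
    | none => simp [h2, h1]
    | some apos =>
      have h := (pv_main (apos.length + bpos.length) apos bpos rfl).1 none (by simp)
      simp [h2, h1, h]
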